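-- pv_equiv track=rewrite | github.com/ShubhamKaudewar/DSA_Practice | heap_stacks/heap_food_orders.py | customer_service
-- ===== SOURCE A (Python) =====
-- import heapq
--
-- def customer_service(orders, k, w):
--     n = len(orders)
--     # Min heap
--     placed_orders = []  # (order_duration, order_time, order_index)
--     current_time = 0
--     next_order_index = 0
--
--     order_cost = [0] * n
--
--     while next_order_index < n or placed_orders:
--         # Push the orders available at current_time to the heap
--         while next_order_index < n and current_time >= orders[next_order_index][0]:
--             order_duration = orders[next_order_index][1]
--             order_time = orders[next_order_index][0]
--             order_index = next_order_index
--             heapq.heappush(placed_orders, (order_duration, order_time, order_index))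
--             next_order_index += 1
--
--         # If nothing available at current time
--         if not placed_orders:
--             current_time = orders[next_order_index][0]
--             continue
--
--         # Handle next order
--         next_order = heapq.heappop(placed_orders)
--         wait_time = current_time - next_order[1]
--         prep_time = next_order[0]
--         order_index = next_order[2]
--
--         order_cost[order_index] = max(k * prep_time - w * wait_time, 0)
--         current_time += prep_time
--
--     return order_cost
-- ===== SOURCE B (Python) =====
-- def customer_service(orders, k, w):
--     # Event-emission restructuring: consume an enumerated queue from the front,
--     # keep available orders as (arrival, duration, index) tuples, pick the next
--     # order by min over the heapq key (duration, arrival, index), and emit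
--     # (index, cost) events; the cost array is assembled in a final pass.
--     queue = list(enumerate(orders))
--     pending = []            # (arrival, duration, index)
--     t = 0
--     done = []               # (index, cost) in processing order
--     while queue or pending:
--         while queue and t >= queue[0][1][0]:
--             i, (a, d) = queue.pop(0)
--             pending.append((a, d, i))
--         if pending:
--             best = min(pending, key=lambda p: (p[1], p[0], p[2]))
--             pending.remove(best)
--             a, d, i = best
--             done.append((i, max(k * d - w * (t - a), 0)))
--             t += d
--         else:
--             t = queue[0][1][0]
--     cost = [0] * len(orders)
--     for i, c in done:
--         cost[i] = c
--     return cost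
-- ===== Notes on version B (the rewrite author's own statement) =====
-- stated objective: alternative
-- what changed: Replaced A's index cursor + binary heap + in-place cost writes by consuming an enumerated queue from the front, holding available orders as plain (arrival, duration, index) tuples chosen by a keyed min-scan, emitting (index, cost) events, and assembling the cost array in a separate final pass.
import Mathlib
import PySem

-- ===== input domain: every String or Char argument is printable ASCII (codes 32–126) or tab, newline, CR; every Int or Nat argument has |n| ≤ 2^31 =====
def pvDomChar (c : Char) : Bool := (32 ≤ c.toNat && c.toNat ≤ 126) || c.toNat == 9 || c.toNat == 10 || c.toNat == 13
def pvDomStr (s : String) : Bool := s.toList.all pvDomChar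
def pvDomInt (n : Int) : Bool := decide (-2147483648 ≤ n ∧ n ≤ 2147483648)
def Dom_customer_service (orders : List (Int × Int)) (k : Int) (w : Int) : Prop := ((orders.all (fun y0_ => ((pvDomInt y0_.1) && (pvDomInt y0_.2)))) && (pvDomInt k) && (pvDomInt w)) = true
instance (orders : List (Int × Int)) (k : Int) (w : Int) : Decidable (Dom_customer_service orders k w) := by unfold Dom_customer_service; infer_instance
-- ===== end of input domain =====

-- B restructures A: instead of an index cursor, a heap and in-place cost writes, it consumes an
-- enumerated queue from the front, keeps pending orders as plain (arrival, duration, index)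
-- tuples picked by a min-scan, emits (index, cost) events, and assembles the array in a final pass.

-- ===== PORT A =====
-- lexicographic ≤ on the heap tuples (order_duration, order_time, order_index)
def hle (a b : Int × Int × Int) : Bool :=
  a.1 < b.1 || (a.1 == b.1 && (a.2.1 < b.2.1 || (a.2.1 == b.2.1 && a.2.2 ≤ b.2.2)))

-- heapq.heappush / heappop ported as the corresponding priority-queue operations on an
-- ordered list (pop always yields the lexicographic minimum, exactly heapq's pop order).
def heappush : List (Int × Int × Int) → (Int × Int × Int) → List (Int × Int × Int)
  | [], x => [x]
  | h :: t, x => if hle x h then x :: h :: t else h :: heappush t x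

-- inner while: push all orders available at current_time
def pushOrders (orders : List (Int × Int)) (cur : Int) (next : Nat) (pq : List (Int × Int × Int)) :
    Nat × List (Int × Int × Int) :=
  if h : next < orders.length then
    if cur ≥ (orders[next]'h).1 then
      pushOrders orders cur (next + 1) (heappush pq ((orders[next]'h).2, (orders[next]'h).1, (next : Int)))
    else (next, pq)
  else (next, pq)
termination_by orders.length - next

-- outer while loop; fuel 2*n+1 bounds its iterations (n pops, each jump is followed by a pop)
def loopA (orders : List (Int × Int)) (k w : Int) :
    Nat → Nat → List (Int × Int × Int) → Int → List Int → List Int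
  | 0, _, _, _, cost => cost
  | fuel + 1, next, pq, cur, cost =>
    if next < orders.length ∨ pq ≠ [] then
      let r := pushOrders orders cur next pq
      match r.2 with
      | [] => loopA orders k w fuel r.1 [] ((orders.getD r.1 (0, 0)).1) cost
      | t :: rest =>
        -- heappop: t is the heap minimum; order_cost[order_index] (index nonneg, in range)
        loopA orders k w fuel r.1 rest (cur + t.1)
          (cost.set t.2.2.toNat (max (k * t.1 - w * (cur - t.2.1)) 0))
    else cost

def customer_service (orders : List (Int × Int)) (k : Int) (w : Int) : List Int :=
  loopA orders k w (2 * orders.length + 1) 0 [] 0 (List.replicate orders.length 0)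

-- ===== PORT B =====
-- min's key: lambda p: (p[1], p[0], p[2])
def keyOf (p : Int × Int × Int) : Int × Int × Int := (p.2.1, p.1, p.2.2)

-- strict lexicographic < on key triples, as Python compares them in min
def klt (a b : Int × Int × Int) : Bool :=
  a.1 < b.1 || (a.1 == b.1 && (a.2.1 < b.2.1 || (a.2.1 == b.2.1 && a.2.2 < b.2.2)))

-- inner while: move arrived orders from the front of the queue into pending
def arrive (tm : Int) : List (Int × (Int × Int)) → List (Int × Int × Int) →
    List (Int × (Int × Int)) × List (Int × Int × Int)
  | [], pend => ([], pend)
  | (i, (a, d)) :: rest, pend =>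
    if tm ≥ a then arrive tm rest (pend ++ [(a, d, i)])
    else ((i, (a, d)) :: rest, pend)

-- min(pending, key=keyOf): first element with minimal key (strict comparison keeps the first)
def minKey (p : Int × Int × Int) (ps : List (Int × Int × Int)) : Int × Int × Int :=
  ps.foldl (fun b x => if klt (keyOf x) (keyOf b) then x else b) p

-- pending.remove(best): drop the first occurrence
def removeFirst : List (Int × Int × Int) → (Int × Int × Int) → List (Int × Int × Int)
  | [], _ => []
  | h :: tl, x => if h = x then tl else h :: removeFirst tl x

-- outer while loop, emitting the (index, cost) events in processing order
def loopB (k w : Int) :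
    Nat → List (Int × (Int × Int)) → List (Int × Int × Int) → Int → List (Int × Int)
  | 0, _, _, _ => []
  | fuel + 1, q, pend, tm =>
    if q ≠ [] ∨ pend ≠ [] then
      let r := arrive tm q pend
      match r.2 with
      | p :: ps =>
        let best := minKey p ps
        (best.2.2, max (k * best.2.1 - w * (tm - best.1)) 0) ::
          loopB k w fuel r.1 (removeFirst (p :: ps) best) (tm + best.2.1)
      | [] =>
        match r.1 with
        | (_, (a, _)) :: _ => loopB k w fuel r.1 [] a
        | [] => []  -- unreachable: pending and queue both empty contradicts the loop condition
    else []

def customer_service_alt (orders : List (Int × Int)) (k : Int) (w : Int) : List Int :=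
  (loopB k w (2 * orders.length + 1) (PySem.List.enumerate orders 0) [] 0).foldl
    (fun c p => c.set p.1.toNat p.2) (List.replicate orders.length 0)

-- ===== PRECONDITION & SPEC =====
def Spec_customer_service (orders : List (Int × Int)) (k : Int) (w : Int) (out : List Int) : Prop := out = customer_service_alt orders k w
instance (orders : List (Int × Int)) (k : Int) (w : Int) (out : List Int) : Decidable (Spec_customer_service orders k w out) := by unfold Spec_customer_service; infer_instance

-- ===== CLAIM (what is proved, stated in full; the proofs are below) =====
def Claim_equal_customer_service : Prop := ∀ (orders : List (Int × Int)) (k : Int) (w : Int), Dom_customer_service orders k w → Spec_customer_service orders k w (customer_service orders k w)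

-- ===== LEMMAS AND PROOFS =====

theorem hle_refl (a : Int × Int × Int) : hle a a := by simp [hle]

theorem hle_total (a b : Int × Int × Int) : hle a b ∨ hle b a := by
  simp [hle]; omega

theorem hle_antisymm {a b : Int × Int × Int} (h1 : hle a b) (h2 : hle b a) : a = b := by
  obtain ⟨a1, a2, a3⟩ := a; obtain ⟨b1, b2, b3⟩ := b
  simp [hle] at h1 h2
  simp only [Prod.mk.injEq]
  omega

theorem hle_trans {a b c : Int × Int × Int} (h1 : hle a b) (h2 : hle b c) : hle a c := by
  obtain ⟨a1, a2, a3⟩ := a; obtain ⟨b1, b2, b3⟩ := b; obtain ⟨c1, c2, c3⟩ := c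
  simp [hle] at *; omega

theorem klt_iff (a b : Int × Int × Int) : klt a b = !hle b a := by
  obtain ⟨a1, a2, a3⟩ := a; obtain ⟨b1, b2, b3⟩ := b
  rw [Bool.eq_iff_iff]
  simp [klt, hle]
  omega

theorem keyOf_inj {a b : Int × Int × Int} (h : keyOf a = keyOf b) : a = b := by
  obtain ⟨a1, a2, a3⟩ := a; obtain ⟨b1, b2, b3⟩ := b
  simp [keyOf, Prod.ext_iff] at h ⊢
  tauto

-- sortedness predicate for the A-side priority queue
def SortedH (l : List (Int × Int × Int)) : Prop := l.Pairwise (fun a b => hle a b = true)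

theorem heappush_perm (l : List (Int × Int × Int)) (x : Int × Int × Int) :
    (heappush l x).Perm (x :: l) := by
  induction l with
  | nil => simp [heappush]
  | cons h t ih =>
    simp only [heappush]
    split
    · exact List.Perm.refl _
    · exact (List.Perm.cons h ih).trans (List.Perm.swap x h t)

theorem heappush_sorted {l : List (Int × Int × Int)} (hs : SortedH l) (x : Int × Int × Int) :
    SortedH (heappush l x) := by
  induction l with
  | nil => simp [heappush, SortedH]
  | cons h t ih =>
    rcases List.pairwise_cons.mp hs with ⟨hh, ht⟩
    simp only [heappush]
    split
    · rename_i hx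
      refine List.pairwise_cons.mpr ⟨?_, hs⟩
      intro b hb
      rcases List.mem_cons.mp hb with rfl | hb'
      · exact hx
      · exact hle_trans hx (hh _ hb')
    · rename_i hx
      refine List.pairwise_cons.mpr ⟨?_, ih ht⟩
      intro b hb
      rcases List.mem_cons.mp ((heappush_perm t x).mem_iff.mp hb) with rfl | hb'
      · rcases hle_total h b with h' | h'
        · exact h'
        · exact absurd h' (by simpa using hx)
      · exact hh _ hb'

-- the min-scan in B yields a member of the list
theorem minKey_mem (z : Int × Int × Int) (t : List (Int × Int × Int)) :
    minKey z t ∈ z :: t := by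
  unfold minKey
  induction t generalizing z with
  | nil => simp
  | cons y ys ih =>
    simp only [List.foldl]
    split
    · have := ih y
      simp at this ⊢
      tauto
    · have := ih z
      simp at this ⊢
      tauto

-- … and its key is minimal under hle
theorem minKey_le (z : Int × Int × Int) (t : List (Int × Int × Int)) :
    ∀ x ∈ z :: t, hle (keyOf (minKey z t)) (keyOf x) := by
  unfold minKey
  induction t generalizing z with
  | nil => intro x hx; simp at hx; subst hx; exact hle_refl _
  | cons y ys ih =>
    intro x hx
    simp only [List.foldl]
    have hmi := klt_iff (keyOf y) (keyOf z)
    by_cases hm : klt (keyOf y) (keyOf z) = true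
    · have hzy : hle (keyOf z) (keyOf y) = false := by
        rw [hmi] at hm; simpa using hm
      have hyz : hle (keyOf y) (keyOf z) := by
        rcases hle_total (keyOf y) (keyOf z) with h' | h'
        · exact h'
        · rw [h'] at hzy; exact absurd hzy (by simp)
      rw [if_pos hm]
      rcases List.mem_cons.mp hx with rfl | hx'
      · exact hle_trans (ih y y (by simp)) hyz
      · exact ih y x hx'
    · have hzy : hle (keyOf z) (keyOf y) := by
        rw [hmi] at hm; simpa using hm
      rw [if_neg hm]
      rcases List.mem_cons.mp hx with rfl | hx'
      · exact ih x x (by simp)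
      rcases List.mem_cons.mp hx' with rfl | hx''
      · exact hle_trans (ih z z (by simp)) hzy
      · exact ih z x (by simp [hx''])

theorem map_removeFirst (l : List (Int × Int × Int)) (x : Int × Int × Int) :
    (removeFirst l x).map keyOf = (l.map keyOf).erase (keyOf x) := by
  induction l with
  | nil => simp [removeFirst]
  | cons h tl ih =>
    simp only [removeFirst, List.map_cons, List.erase_cons]
    by_cases he : h = x
    · subst he; simp
    · have : (keyOf h == keyOf x) = false := by
        simp only [beq_eq_false_iff_ne, ne_eq]
        intro hc; exact he (keyOf_inj hc)
      rw [if_neg he, this]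
      simp [ih]

-- one step of the enumerated queue
theorem enum_drop_step (orders : List (Int × Int)) {next : Nat} (h : next < orders.length) :
    (PySem.List.enumerate orders 0).drop next =
      ((next : Int), orders[next]'h) :: (PySem.List.enumerate orders 0).drop (next + 1) := by
  have hlen : next < (PySem.List.enumerate orders 0).length := by
    simpa [PySem.List.length_enumerate] using h
  rw [List.drop_eq_getElem_cons hlen]
  simp [PySem.List.getElem_enumerate]

-- the inner while loops advance in lockstep
theorem push_arrive (orders : List (Int × Int)) (cur : Int) (next : Nat)
    (pqA : List (Int × Int × Int)) (pend : List (Int × Int × Int))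
    (hs : SortedH pqA) (hp : pqA.Perm (pend.map keyOf)) :
    (arrive cur ((PySem.List.enumerate orders 0).drop next) pend).1 =
      (PySem.List.enumerate orders 0).drop (pushOrders orders cur next pqA).1 ∧
    SortedH (pushOrders orders cur next pqA).2 ∧
    (pushOrders orders cur next pqA).2.Perm
      ((arrive cur ((PySem.List.enumerate orders 0).drop next) pend).2.map keyOf) := by
  unfold pushOrders
  split
  · rename_i hlt
    rw [enum_drop_step orders hlt]
    simp only [arrive]
    split
    · rename_i hcur
      rw [if_pos (by exact hcur)]
      have hx := push_arrive orders cur (next + 1)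
        (heappush pqA ((orders[next]'hlt).2, (orders[next]'hlt).1, (next : Int)))
        (pend ++ [((orders[next]'hlt).1, (orders[next]'hlt).2, (next : Int))])
        (heappush_sorted hs _) ?_
      · exact hx
      · refine (heappush_perm pqA _).trans ?_
        have : (pend ++ [((orders[next]'hlt).1, (orders[next]'hlt).2, (next : Int))]).map keyOf
            = pend.map keyOf ++ [((orders[next]'hlt).2, (orders[next]'hlt).1, (next : Int))] := by
          simp [keyOf]
        rw [this]
        exact (List.Perm.cons _ hp).trans (List.perm_append_singleton _ _).symm
    · rename_i hcur
      rw [if_neg (by exact hcur)]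
      exact ⟨(enum_drop_step orders hlt).symm, hs, hp⟩
  · rename_i hge
    have : (PySem.List.enumerate orders 0).drop next = [] := by
      apply List.drop_eq_nil_of_le
      simp [PySem.List.length_enumerate]; omega
    rw [this]
    simp only [arrive]
    refine ⟨?_, hs, hp⟩
    simp
termination_by orders.length - next

-- loopA on an exhausted state returns the cost array unchanged
theorem loopA_done (orders : List (Int × Int)) (k w : Int) (fuel : Nat) (next : Nat)
    (cur : Int) (cost : List Int) (h : ¬ next < orders.length) :
    loopA orders k w fuel next [] cur cost = cost := by
  cases fuel with
  | zero => rfl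
  | succ f => simp [loopA, h]

-- main lockstep invariant
theorem loop_eq (orders : List (Int × Int)) (k w : Int) (fuel : Nat) :
    ∀ (next : Nat) (pqA pend : List (Int × Int × Int)) (cur : Int) (cost : List Int),
      SortedH pqA → pqA.Perm (pend.map keyOf) →
      loopA orders k w fuel next pqA cur cost =
        (loopB k w fuel ((PySem.List.enumerate orders 0).drop next) pend cur).foldl
          (fun c p => c.set p.1.toNat p.2) cost := by
  induction fuel with
  | zero => intro next pqA pend cur cost _ _; rfl
  | succ fuel ih =>
    intro next pqA pend cur cost hs hp
    have hqiff : (PySem.List.enumerate orders 0).drop next ≠ [] ↔ next < orders.length := by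
      rw [ne_eq, List.drop_eq_nil_iff]
      simp [PySem.List.length_enumerate]
    have hpiff : pqA ≠ [] ↔ pend ≠ [] := by
      constructor
      · intro h hn; apply h; subst hn; simpa using hp
      · intro h hn; apply h; subst hn; simpa using hp
    simp only [loopA, loopB]
    by_cases hc : next < orders.length ∨ pqA ≠ []
    · have hcB : (PySem.List.enumerate orders 0).drop next ≠ [] ∨ pend ≠ [] := by
        rcases hc with h | h
        · exact Or.inl (hqiff.mpr h)
        · exact Or.inr (hpiff.mp h)
      rw [if_pos hc, if_pos hcB]
      obtain ⟨h1, h2, h3⟩ := push_arrive orders cur next pqA pend hs hp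
      set rA := pushOrders orders cur next pqA with hrA
      set rB := arrive cur ((PySem.List.enumerate orders 0).drop next) pend with hrB
      match hA : rA.2, hB : rB.2 with
      | [], [] =>
        simp only []
        -- jump branch of both loops
        by_cases hn : rA.1 < orders.length
        · rcases ho : orders[rA.1]'hn with ⟨a, d⟩
          have hstep : (PySem.List.enumerate orders 0).drop rA.1
              = ((rA.1 : Int), (a, d)) :: (PySem.List.enumerate orders 0).drop (rA.1 + 1) := by
            rw [enum_drop_step orders hn, ho]
          have hq' : rB.1 = ((rA.1 : Int), (a, d)) :: (PySem.List.enumerate orders 0).drop (rA.1 + 1) := by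
            rw [h1, hstep]
          rw [hq']
          have hgd : (orders.getD rA.1 (0, 0)).1 = a := by
            rw [List.getD_eq_getElem orders (0, 0) hn, ho]
          rw [hgd]
          have hrec := ih rA.1 [] [] a cost (by simp [SortedH]) (by simp)
          rw [hstep] at hrec
          exact hrec
        · have hq0 : rB.1 = [] := by
            rw [h1, List.drop_eq_nil_of_le]
            simp [PySem.List.length_enumerate]; omega
          rw [hq0]
          simp only [List.foldl]
          exact loopA_done orders k w fuel rA.1 _ cost hn
      | [], b :: bs => rw [hA, hB] at h3; simp at h3
      | a :: as, [] => rw [hA, hB] at h3; simp at h3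
      | t :: rest, p :: ps =>
        rw [hA, hB] at h3
        set best := minKey p ps with hbest
        have hmemB : best ∈ p :: ps := minKey_mem p ps
        have hsA : SortedH (t :: rest) := hA ▸ h2
        have htmin : ∀ x ∈ t :: rest, hle t x := by
          intro x hx
          rcases hx with _ | hx
          · exact hle_refl t
          · exact (List.pairwise_cons.mp hsA).1 x (by assumption)
        have hkmem : keyOf best ∈ (p :: ps).map keyOf := List.mem_map_of_mem hmemB
        have h_t_le : hle t (keyOf best) := htmin _ (h3.symm.mem_iff.mp hkmem)
        have h_le_t : hle (keyOf best) t := by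
          rcases List.mem_map.mp (h3.mem_iff.mp List.mem_cons_self) with ⟨x, hxmem, hxeq⟩
          exact hxeq ▸ minKey_le p ps x hxmem
        have hbt : keyOf best = t := hle_antisymm h_le_t h_t_le
        have hperm' : rest.Perm ((removeFirst (p :: ps) best).map keyOf) := by
          rw [map_removeFirst, hbt]
          have := h3.erase t
          rwa [List.erase_cons_head] at this
        simp only [List.foldl]
        rw [h1]
        have e1 : t.1 = best.2.1 := by rw [← hbt]; rfl
        have e2 : t.2.1 = best.1 := by rw [← hbt]; rfl
        have e3 : t.2.2 = best.2.2 := by rw [← hbt]; rfl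
        rw [e1, e2, e3]
        exact ih rA.1 rest (removeFirst (p :: ps) best) (cur + best.2.1) _
          (List.pairwise_cons.mp hsA).2 hperm'
    · rw [if_neg hc, if_neg (fun hB => hc (by
        rcases hB with h | h
        · exact Or.inl (hqiff.mp h)
        · exact Or.inr (hpiff.mpr h)))]
      simp

-- ===== VERDICT (by name: the statement is the Claim_ definition above) =====
theorem customer_service_spec : Claim_equal_customer_service := by
  intro orders k w _
  show customer_service orders k w = customer_service_alt orders k w
  unfold customer_service customer_service_alt
  have := loop_eq orders k w (2 * orders.length + 1) 0 [] [] 0 (List.replicate orders.length 0)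
    (by simp [SortedH]) (by simp)
  simpa using this
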